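-- pv_equiv track=rewrite | github.com/Realistic3D-MIUN/DUALF-D | compression_pipeline.py | _create_zigzag_pattern
-- ===== SOURCE A (Python) =====
-- from typing import Dict, Tuple, List, Optional
--
-- def _create_zigzag_pattern(height: int, width: int) -> List[Tuple[int, int]]:
--     """
--     Create zigzag scanning pattern for 2D data.
--
--     Args:
--         height: Height of the 2D array
--         width: Width of the 2D array
--
--     Returns:
--         List of (row, col) coordinates in zigzag order
--     """
--     pattern = []
--
--     # Start from top-left
--     for i in range(height + width - 1):
--         if i % 2 == 0:  # Even diagonals (bottom-left to top-right)
--             for j in range(max(0, i - height + 1), min(i + 1, width)):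
--                 row = i - j
--                 col = j
--                 if 0 <= row < height and 0 <= col < width:
--                     pattern.append((row, col))
--         else:  # Odd diagonals (top-right to bottom-left)
--             for j in range(min(i, width - 1), max(-1, i - height), -1):
--                 row = i - j
--                 col = j
--                 if 0 <= row < height and 0 <= col < width:
--                     pattern.append((row, col))
--
--     return pattern
-- ===== SOURCE B (Python) =====
-- from typing import List, Tuple
--
-- def _create_zigzag_pattern(height: int, width: int) -> List[Tuple[int, int]]:
--     # Index-then-sort: enumerate all cells row-major, then sort by a packed
--     # zigzag key (diagonal number first; within a diagonal, column ascending
--     # on even diagonals and descending on odd ones).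
--     if height <= 0 or width <= 0:
--         return []
--     coords = [(r, c) for r in range(height) for c in range(width)]
--     stride = 2 * width
--     return sorted(coords,
--                   key=lambda rc: (rc[0] + rc[1]) * stride
--                                  + (rc[1] if (rc[0] + rc[1]) % 2 == 0 else -rc[1]))
-- ===== Notes on version B (the rewrite author's own statement) =====
-- stated objective: alternative
-- what changed: Replaces A's diagonal-by-diagonal emission with computed bounds and an inner bounds guard by an index-then-sort strategy: build the row-major list of all coordinates and sort it once by a packed zigzag key (diagonal number, then signed column).
import Mathlib
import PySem

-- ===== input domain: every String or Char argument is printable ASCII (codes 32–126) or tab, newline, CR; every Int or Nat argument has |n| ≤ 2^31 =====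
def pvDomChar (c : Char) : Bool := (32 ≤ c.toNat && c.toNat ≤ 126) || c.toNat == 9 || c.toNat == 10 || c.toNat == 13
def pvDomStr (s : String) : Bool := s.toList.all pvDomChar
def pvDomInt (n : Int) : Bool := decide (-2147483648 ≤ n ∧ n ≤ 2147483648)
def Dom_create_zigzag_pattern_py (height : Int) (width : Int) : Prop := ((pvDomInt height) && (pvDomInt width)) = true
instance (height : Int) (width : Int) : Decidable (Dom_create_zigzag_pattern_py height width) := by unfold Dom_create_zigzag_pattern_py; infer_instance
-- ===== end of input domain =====

-- B replaces A's diagonal-walk emission by building the row-major coordinate list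
-- and sorting it once by a packed zigzag key (alternative algorithm, not faster).

-- ===== PORT A =====
-- literal transliteration of A: walk the diagonals, even ones by ascending j,
-- odd ones by a descending range, guarding each (row, col) against the bounds
def create_zigzag_pattern_py (height : Int) (width : Int) : List (Int × Int) :=
  (PySem.List.pyRange 0 (height + width - 1)).foldl (fun pattern i =>
    if PySem.Int.mod i 2 = 0 then
      (PySem.List.pyRange (max 0 (i - height + 1)) (min (i + 1) width)).foldl
        (fun pattern j =>
          if 0 ≤ i - j ∧ i - j < height ∧ 0 ≤ j ∧ j < width then
            pattern ++ [(i - j, j)]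
          else pattern)
        pattern
    else
      (PySem.List.pyRange (min i (width - 1)) (max (-1) (i - height)) (-1)).foldl
        (fun pattern j =>
          if 0 ≤ i - j ∧ i - j < height ∧ 0 ≤ j ∧ j < width then
            pattern ++ [(i - j, j)]
          else pattern)
        pattern) []

-- ===== PORT B =====
-- coords = [(r, c) for r in range(height) for c in range(width)]
def zzCoords (height : Int) (width : Int) : List (Int × Int) :=
  (PySem.List.pyRange 0 height).flatMap
    (fun r => (PySem.List.pyRange 0 width).map (fun c => (r, c)))

-- the packed zigzag sort key of Source B (stride = 2 * width)
def zzKey (width : Int) (rc : Int × Int) : Int :=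
  (rc.1 + rc.2) * (2 * width) +
    (if PySem.Int.mod (rc.1 + rc.2) 2 = 0 then rc.2 else -rc.2)

def create_zigzag_pattern_py_alt (height : Int) (width : Int) : List (Int × Int) :=
  if height ≤ 0 ∨ width ≤ 0 then []
  else PySem.List.sorted (zzCoords height width) (zzKey width)

-- ===== PRECONDITION & SPEC =====
def Spec_create_zigzag_pattern_py (height : Int) (width : Int) (out : List (Int × Int)) : Prop := out = create_zigzag_pattern_py_alt height width
instance (height : Int) (width : Int) (out : List (Int × Int)) : Decidable (Spec_create_zigzag_pattern_py height width out) := by unfold Spec_create_zigzag_pattern_py; infer_instance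

-- ===== CLAIM (what is proved, stated in full; the proofs are below) =====
def Claim_equal_create_zigzag_pattern_py : Prop := ∀ (height : Int) (width : Int), Dom_create_zigzag_pattern_py height width → Spec_create_zigzag_pattern_py height width (create_zigzag_pattern_py height width)

-- ===== LEMMAS AND PROOFS =====

-- the canonical zigzag list: diagonals in order, each diagonal as a map over its j-range
def zzDiag (height width i : Int) : List (Int × Int) :=
  if PySem.Int.mod i 2 = 0 then
    (PySem.List.pyRange (max 0 (i - height + 1)) (min (i + 1) width)).map (fun j => (i - j, j))
  else
    (PySem.List.pyRange (min i (width - 1)) (max (-1) (i - height)) (-1)).map (fun j => (i - j, j))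

def zzAll (height width : Int) : List (Int × Int) :=
  (PySem.List.pyRange 0 (height + width - 1)).flatMap (zzDiag height width)

-- Prop-condition version of PySem.List.foldl_append_if
lemma foldl_append_ite {α β : Type} (P : α → Prop) [DecidablePred P] (f : α → β)
    (l : List α) (acc : List β) :
    l.foldl (fun acc x => if P x then acc ++ [f x] else acc) acc
      = acc ++ (l.filter (fun x => decide (P x))).map f := by
  have h := PySem.List.foldl_append_if (fun x => decide (P x)) f l acc
  simpa using h

lemma mem_zzDiag {h w i : Int} {p : Int × Int} :
    p ∈ zzDiag h w i ↔ (p.1 + p.2 = i ∧ 0 ≤ p.1 ∧ p.1 < h ∧ 0 ≤ p.2 ∧ p.2 < w) := by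
  obtain ⟨a, b⟩ := p
  unfold zzDiag
  split_ifs with hpar <;>
    simp only [List.mem_map, PySem.List.mem_pyRange_one, PySem.List.mem_pyRange_neg_one,
      Prod.mk.injEq] <;> constructor
  · rintro ⟨j, hj, h1, h2⟩; omega
  · rintro ⟨hs, hb⟩; exact ⟨b, by omega, by omega, rfl⟩
  · rintro ⟨j, hj, h1, h2⟩; omega
  · rintro ⟨hs, hb⟩; exact ⟨b, by omega, by omega, rfl⟩

lemma mem_zzAll {h w : Int} {p : Int × Int} :
    p ∈ zzAll h w ↔ (0 ≤ p.1 ∧ p.1 < h ∧ 0 ≤ p.2 ∧ p.2 < w) := by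
  simp only [zzAll, List.mem_flatMap, PySem.List.mem_pyRange_one, mem_zzDiag]
  constructor
  · rintro ⟨i, _, _⟩; omega
  · intro hb; exact ⟨p.1 + p.2, by omega, by omega⟩

lemma pairwise_key_zzDiag (h w i : Int) :
    (zzDiag h w i).Pairwise (fun a b => zzKey w a < zzKey w b) := by
  unfold zzDiag
  split_ifs with hpar
  · rw [List.pairwise_map]
    refine (PySem.List.pairwise_lt_pyRange_one _ _).imp ?_
    intro j j' hlt
    simp only [zzKey, show ∀ x : Int, i - x + x = i from fun x => by ring, if_pos hpar]
    linarith
  · rw [PySem.List.pyRange_neg_one_eq_reverse, List.map_reverse, List.pairwise_reverse,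
      List.pairwise_map]
    refine (PySem.List.pairwise_lt_pyRange_one _ _).imp ?_
    intro j j' hlt
    simp only [zzKey, show ∀ x : Int, i - x + x = i from fun x => by ring, if_neg hpar]
    linarith

lemma key_lt_of_diag_lt {h w i i' : Int} (hii : i < i') {x y : Int × Int}
    (hx : x ∈ zzDiag h w i) (hy : y ∈ zzDiag h w i') : zzKey w x < zzKey w y := by
  rw [mem_zzDiag] at hx hy
  obtain ⟨hsx, hx1, hx2, hx3, hx4⟩ := hx
  obtain ⟨hsy, hy1, hy2, hy3, hy4⟩ := hy
  have hw : 1 ≤ w := by omega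
  have hmul : i * (2 * w) + 2 * w ≤ i' * (2 * w) := by nlinarith
  simp only [zzKey, hsx, hsy]
  split_ifs <;> linarith

lemma pairwise_key_zzAll (h w : Int) :
    (zzAll h w).Pairwise (fun a b => zzKey w a < zzKey w b) := by
  unfold zzAll
  rw [List.pairwise_flatMap]
  exact ⟨fun i _ => pairwise_key_zzDiag h w i,
    (PySem.List.pairwise_lt_pyRange_one _ _).imp
      (fun hlt x hx y hy => key_lt_of_diag_lt hlt hx hy)⟩

lemma nodup_zzAll (h w : Int) : (zzAll h w).Nodup :=
  (pairwise_key_zzAll h w).imp (fun hlt he => by rw [he] at hlt; exact lt_irrefl _ hlt)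

lemma mem_zzCoords {h w : Int} {p : Int × Int} :
    p ∈ zzCoords h w ↔ (0 ≤ p.1 ∧ p.1 < h ∧ 0 ≤ p.2 ∧ p.2 < w) := by
  obtain ⟨a, b⟩ := p
  simp only [zzCoords, List.mem_flatMap, List.mem_map, PySem.List.mem_pyRange_one,
    Prod.mk.injEq]
  constructor
  · rintro ⟨r, hr, c, hc, h1, h2⟩; omega
  · rintro hb; exact ⟨a, by omega, b, by omega, rfl, rfl⟩

lemma nodup_zzCoords (h w : Int) : (zzCoords h w).Nodup := by
  unfold zzCoords
  show List.Pairwise _ _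
  rw [List.pairwise_flatMap]
  constructor
  · intro r _
    rw [List.pairwise_map]
    exact (PySem.List.nodup_pyRange_one _ _).imp
      (fun hne he => hne (by simpa using congrArg Prod.snd he))
  · refine (PySem.List.pairwise_lt_pyRange_one _ _).imp ?_
    intro r r' hlt x hx y hy
    simp only [List.mem_map] at hx hy
    obtain ⟨c, _, rfl⟩ := hx
    obtain ⟨c', _, rfl⟩ := hy
    intro he
    have := congrArg Prod.fst he
    simp at this
    omega

lemma zzAll_perm_zzCoords (h w : Int) : (zzAll h w).Perm (zzCoords h w) :=
  (List.perm_ext_iff_of_nodup (nodup_zzAll h w) (nodup_zzCoords h w)).mpr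
    (fun p => by rw [mem_zzAll, mem_zzCoords])

lemma alt_eq_zzAll (h w : Int) : create_zigzag_pattern_py_alt h w = zzAll h w := by
  unfold create_zigzag_pattern_py_alt
  split_ifs with hd
  · symm
    rw [List.eq_nil_iff_forall_not_mem]
    intro p hp
    rw [mem_zzAll] at hp
    omega
  · exact PySem.List.sorted_eq_of_perm_of_pairwise_lt _ _ _
      (zzAll_perm_zzCoords h w) (pairwise_key_zzAll h w)

lemma a_eq_zzAll (h w : Int) : create_zigzag_pattern_py h w = zzAll h w := by
  unfold create_zigzag_pattern_py zzAll
  have hbody : (fun (pattern : List (Int × Int)) (i : Int) =>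
      if PySem.Int.mod i 2 = 0 then
        (PySem.List.pyRange (max 0 (i - h + 1)) (min (i + 1) w)).foldl
          (fun pattern j =>
            if 0 ≤ i - j ∧ i - j < h ∧ 0 ≤ j ∧ j < w then pattern ++ [(i - j, j)] else pattern)
          pattern
      else
        (PySem.List.pyRange (min i (w - 1)) (max (-1) (i - h)) (-1)).foldl
          (fun pattern j =>
            if 0 ≤ i - j ∧ i - j < h ∧ 0 ≤ j ∧ j < w then pattern ++ [(i - j, j)] else pattern)
          pattern)
      = (fun pattern i => pattern ++ zzDiag h w i) := by
    funext pattern i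
    unfold zzDiag
    split_ifs with hpar
    · rw [foldl_append_ite, List.filter_eq_self.mpr ?_]
      intro j hj
      rw [PySem.List.mem_pyRange_one] at hj
      simp only [decide_eq_true_eq]
      omega
    · rw [foldl_append_ite, List.filter_eq_self.mpr ?_]
      intro j hj
      rw [PySem.List.mem_pyRange_neg_one] at hj
      simp only [decide_eq_true_eq]
      omega
  rw [hbody, PySem.List.foldl_append_eq_flatMap, List.nil_append]

-- ===== VERDICT (by name: the statement is the Claim_ definition above) =====
theorem create_zigzag_pattern_py_spec : Claim_equal_create_zigzag_pattern_py := by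
  intro h w _
  unfold Spec_create_zigzag_pattern_py
  rw [a_eq_zzAll, alt_eq_zzAll]
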